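-- pv_equiv track=rewrite | github.com/vite1k/GeekBrains_Python | Python_HomeWork_5/Task_26.py | recursive_power
-- ===== SOURCE A (Python) =====
-- def recursive_power(a,b):
--     if b == 0:
--         return 1
--     elif b % 2 == 0:
--         temp = recursive_power(a, b // 2)
--         return temp * temp
--     else:
--         temp = recursive_power(a, (b - 1) // 2)
--         return a * temp * temp
-- ===== SOURCE B (Python) =====
-- def recursive_power(a, b):
--     result = 1
--     base = a
--     while b > 0:
--         if b % 2:
--             result *= base
--         base *= base
--         b //= 2
--     return result
-- ===== Notes on version B (the rewrite author's own statement) =====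
-- stated objective: alternative
-- what changed: Replaces top-down recursive squaring with an iterative bottom-up binary-exponentiation loop over the bits of b, accumulating into result.
import Mathlib
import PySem

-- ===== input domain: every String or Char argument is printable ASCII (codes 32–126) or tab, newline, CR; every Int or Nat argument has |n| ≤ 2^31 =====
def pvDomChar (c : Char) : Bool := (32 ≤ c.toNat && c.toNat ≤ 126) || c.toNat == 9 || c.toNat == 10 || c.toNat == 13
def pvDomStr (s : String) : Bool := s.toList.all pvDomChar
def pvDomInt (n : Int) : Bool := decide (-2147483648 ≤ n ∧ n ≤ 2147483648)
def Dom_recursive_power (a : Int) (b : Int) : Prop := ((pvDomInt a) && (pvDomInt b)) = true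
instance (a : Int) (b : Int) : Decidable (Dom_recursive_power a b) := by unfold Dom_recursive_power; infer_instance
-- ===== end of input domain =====

-- B replaces A's top-down recursive squaring with an iterative binary-exponentiation loop (alternative decomposition, same multiplication count).


-- ===== PORT A =====
-- Python A recurses on b; for b < 0 it never terminates (RecursionError), so the
-- port threads fuel (b.toNat + 1 suffices whenever 0 ≤ b; 0 on exhaustion is
-- reached only outside Pre_).
def recPowGo (a : Int) : Nat → Int → Int
  | 0, _ => 0
  | fuel + 1, b =>
    if b = 0 then 1
    else if PySem.Int.mod b 2 = 0 then
      let temp := recPowGo a fuel (PySem.Int.floordiv b 2)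
      temp * temp
    else
      let temp := recPowGo a fuel (PySem.Int.floordiv (b - 1) 2)
      a * temp * temp

def recursive_power (a : Int) (b : Int) : Int := recPowGo a (b.toNat + 1) b

-- ===== PORT B =====
-- while b > 0: if b % 2: result *= base; base *= base; b //= 2
def powLoop (result : Int) (base : Int) (b : Int) : Int :=
  if h : 0 < b then
    powLoop (if PySem.Int.mod b 2 ≠ 0 then result * base else result)
      (base * base) (PySem.Int.floordiv b 2)
  else result
termination_by b.toNat
decreasing_by
  have := PySem.Int.floordiv_eq_ediv_of_pos (a := b) (b := 2) (by omega)
  omega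

def recursive_power_alt (a : Int) (b : Int) : Int := powLoop 1 a b

-- ===== PRECONDITION & SPEC =====
-- Pre_ excludes b < 0, on which Python A recurses forever (RecursionError).
def Pre_recursive_power (a : Int) (b : Int) : Prop := 0 ≤ b
instance (a : Int) (b : Int) : Decidable (Pre_recursive_power a b) := by
  unfold Pre_recursive_power; infer_instance
def pvWitness_recursive_power : Int × Int := (3, 10)

def Spec_recursive_power (a : Int) (b : Int) (out : Int) : Prop := out = recursive_power_alt a b
instance (a : Int) (b : Int) (out : Int) : Decidable (Spec_recursive_power a b out) := by unfold Spec_recursive_power; infer_instance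

-- ===== CLAIM (what is proved, stated in full; the proofs are below) =====
def Claim_equal_recursive_power : Prop := ∀ (a : Int) (b : Int), Dom_recursive_power a b → Pre_recursive_power a b → Spec_recursive_power a b (recursive_power a b)

-- ===== LEMMAS AND PROOFS =====

-- A's port computes a ^ b (as a Nat exponent) whenever 0 ≤ b and the fuel covers b.
theorem recPowGo_eq_pow (a : Int) (fuel : Nat) (b : Int)
    (hb : 0 ≤ b) (hf : b.toNat < fuel) : recPowGo a fuel b = a ^ b.toNat := by
  induction fuel generalizing b with
  | zero => omega
  | succ f ih =>
    rw [recPowGo]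
    by_cases h0 : b = 0
    · simp [h0]
    · have hpos : 0 < b := lt_of_le_of_ne hb (Ne.symm h0)
      have hfd : PySem.Int.floordiv b 2 = b / 2 :=
        PySem.Int.floordiv_eq_ediv_of_pos (by omega)
      have hfd' : PySem.Int.floordiv (b - 1) 2 = (b - 1) / 2 :=
        PySem.Int.floordiv_eq_ediv_of_pos (by omega)
      have hmd : PySem.Int.mod b 2 = b % 2 :=
        PySem.Int.mod_eq_emod_of_pos (by omega)
      by_cases he : PySem.Int.mod b 2 = 0
      · have hev : b % 2 = 0 := by omega
        have h2 : (b / 2).toNat < f := by omega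
        simp only [h0, if_false, he, if_true, hfd]
        rw [ih _ (by omega) h2]
        rw [← pow_add]
        congr 1
        omega
      · have hod : b % 2 = 1 := by omega
        have heq : (b - 1) / 2 = b / 2 := by omega
        have h2 : ((b - 1) / 2).toNat < f := by omega
        simp only [h0, if_false, he, if_false, hfd']
        rw [ih _ (by omega) h2]
        rw [mul_assoc, ← pow_add, ← pow_succ']
        congr 1
        omega

-- B's loop invariant: powLoop r base b = r * base ^ b.toNat for 0 ≤ b.
theorem powLoop_eq_aux (n : Nat) (r base b : Int) (hb : 0 ≤ b) (hn : b.toNat ≤ n) :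
    powLoop r base b = r * base ^ b.toNat := by
  induction n generalizing r base b with
  | zero =>
    have hb0 : b = 0 := by omega
    rw [powLoop, dif_neg (by omega), hb0]
    simp
  | succ n ih =>
    by_cases hpos : 0 < b
    case neg =>
      have hb0 : b = 0 := by omega
      rw [powLoop, dif_neg (by omega), hb0]
      simp
    rw [powLoop, dif_pos hpos]
    have hfd : PySem.Int.floordiv b 2 = b / 2 :=
      PySem.Int.floordiv_eq_ediv_of_pos (by omega)
    have hmd : PySem.Int.mod b 2 = b % 2 :=
      PySem.Int.mod_eq_emod_of_pos (by omega)
    rw [ih _ _ _ (by rw [hfd]; omega) (by rw [hfd]; omega)]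
    by_cases he : PySem.Int.mod b 2 ≠ 0
    · have hod : b % 2 = 1 := by omega
      rw [if_pos he, show base * base = base ^ 2 by ring, ← pow_mul,
        mul_assoc, ← pow_succ', hfd]
      congr 2
      omega
    · have hev : b % 2 = 0 := by omega
      rw [if_neg he, show base * base = base ^ 2 by ring, ← pow_mul, hfd]
      congr 2
      omega

theorem powLoop_eq (r base b : Int) (hb : 0 ≤ b) :
    powLoop r base b = r * base ^ b.toNat :=
  powLoop_eq_aux b.toNat r base b hb le_rfl

-- ===== VERDICT (by name: the statement is the Claim_ definition above) =====
theorem recursive_power_spec : Claim_equal_recursive_power := by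
  intro a b _ hpre
  unfold Spec_recursive_power recursive_power recursive_power_alt
  rw [recPowGo_eq_pow a _ b hpre (by omega), powLoop_eq 1 a b hpre, one_mul]
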